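-- pv_equiv track=rewrite | github.com/Maysambayg/SRIA-Lite-v0.3 | sria_v05_2.py | reason_category_from_reasons
-- ===== SOURCE A (Python) =====
-- from typing import Any, Deque, Dict, List, Optional, Tuple
--
-- def normalize_reason(reason: str) -> str:
--     if reason.startswith("dns_flood"):
--         return "dns_flood"
--     if reason.startswith("large_outbound"):
--         return "large_outbound"
--     if reason.startswith("suspicious_port"):
--         return "suspicious_port"
--     if reason.startswith("suspicious_process"):
--         return "suspicious_process"
--     if reason.startswith("explicit_credential"):
--         return "explicit_credential"
--     if reason.startswith("special_privileges"):
--         return "special_privileges"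
--     if reason.startswith("failed_logon"):
--         return "failed_logon"
--     if reason.startswith("credential_validation"):
--         return "credential_validation"
--     if reason.startswith("correlation_"):
--         return reason
--     if reason.startswith("noisy_process_suppressed"):
--         return "noisy_process_suppressed"
--     if reason.startswith("unusual_"):
--         return "unusual_parent_process"
--     if reason == "infrastructure_downgrade":
--         return "infrastructure_downgrade"
--     return reason or "none"
--
-- def reason_category_from_reasons(reasons: List[str]) -> str:
--     normalized = [normalize_reason(r) for r in reasons]
--     for wanted in (
--         "dns_flood",
--         "large_outbound",
--         "suspicious_port",
--         "suspicious_process",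
--         "explicit_credential",
--         "special_privileges",
--         "failed_logon",
--         "credential_validation",
--     ):
--         if wanted in normalized:
--             return wanted
--     return "other"
-- ===== SOURCE B (Python) =====
-- _CATS = (
--     "dns_flood",
--     "large_outbound",
--     "suspicious_port",
--     "suspicious_process",
--     "explicit_credential",
--     "special_privileges",
--     "failed_logon",
--     "credential_validation",
-- )
--
-- def _rank(r):
--     for i, c in enumerate(_CATS):
--         if r.startswith(c):
--             return i
--     return len(_CATS)
--
-- def reason_category_from_reasons(reasons):
--     best = len(_CATS)
--     for r in reasons:
--         k = _rank(r)
--         if k < best: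
--             best = k
--     return _CATS[best] if best < len(_CATS) else "other"
-- ===== Notes on version B (the rewrite author's own statement) =====
-- stated objective: simpler
-- what changed: Instead of normalizing every reason into a list and then running eight repeated membership scans over it, B makes a single pass tracking the minimum priority rank (prefix index) seen and returns the category at that rank, with the same 'other' fallback.
import Mathlib
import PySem

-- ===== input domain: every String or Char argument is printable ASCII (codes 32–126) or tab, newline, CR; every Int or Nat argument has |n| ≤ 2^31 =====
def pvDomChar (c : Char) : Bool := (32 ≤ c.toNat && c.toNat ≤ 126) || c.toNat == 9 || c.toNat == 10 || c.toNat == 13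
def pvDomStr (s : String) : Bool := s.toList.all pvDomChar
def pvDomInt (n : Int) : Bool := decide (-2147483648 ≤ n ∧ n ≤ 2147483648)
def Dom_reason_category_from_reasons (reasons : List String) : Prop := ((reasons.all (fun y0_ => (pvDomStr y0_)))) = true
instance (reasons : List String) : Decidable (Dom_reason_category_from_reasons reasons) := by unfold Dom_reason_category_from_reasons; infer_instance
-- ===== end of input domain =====

-- One honest line: B replaces A's normalize-then-eight-membership-scans with a single
-- pass tracking the minimum prefix-rank; same results, no intermediate list (objective: simpler).

-- ===== PORT A =====
def normalize_reason (reason : String) : String :=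
  if PySem.Str.startswith reason "dns_flood" then "dns_flood"
  else if PySem.Str.startswith reason "large_outbound" then "large_outbound"
  else if PySem.Str.startswith reason "suspicious_port" then "suspicious_port"
  else if PySem.Str.startswith reason "suspicious_process" then "suspicious_process"
  else if PySem.Str.startswith reason "explicit_credential" then "explicit_credential"
  else if PySem.Str.startswith reason "special_privileges" then "special_privileges"
  else if PySem.Str.startswith reason "failed_logon" then "failed_logon"
  else if PySem.Str.startswith reason "credential_validation" then "credential_validation"
  else if PySem.Str.startswith reason "correlation_" then reason
  else if PySem.Str.startswith reason "noisy_process_suppressed" then "noisy_process_suppressed"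
  else if PySem.Str.startswith reason "unusual_" then "unusual_parent_process"
  else if reason == "infrastructure_downgrade" then "infrastructure_downgrade"
  else if reason == "" then "none" else reason   -- `reason or "none"`

def reason_category_from_reasons (reasons : List String) : String :=
  let normalized := reasons.map normalize_reason
  (([ "dns_flood", "large_outbound", "suspicious_port", "suspicious_process",
      "explicit_credential", "special_privileges", "failed_logon",
      "credential_validation" ] : List String).find?
      (fun wanted => normalized.contains wanted)).getD "other"

-- ===== PORT B =====
def catList : List String :=
  [ "dns_flood", "large_outbound", "suspicious_port", "suspicious_process",
    "explicit_credential", "special_privileges", "failed_logon",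
    "credential_validation" ]

-- `for i, c in enumerate(_CATS): if r.startswith(c): return i` / `return len(_CATS)`
def rankAux (cs : List String) (i : Nat) (r : String) : Nat :=
  match cs with
  | [] => i
  | c :: cs' => if PySem.Str.startswith r c then i else rankAux cs' (i + 1) r

def rankOf (r : String) : Nat := rankAux catList 0 r

def reason_category_from_reasons_alt (reasons : List String) : String :=
  let best := reasons.foldl (fun b r => if rankOf r < b then rankOf r else b) catList.length
  if best < catList.length then catList.getD best "other" else "other"

-- ===== PRECONDITION & SPEC =====
def Spec_reason_category_from_reasons (reasons : List String) (out : String) : Prop := out = reason_category_from_reasons_alt reasons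
instance (reasons : List String) (out : String) : Decidable (Spec_reason_category_from_reasons reasons out) := by unfold Spec_reason_category_from_reasons; infer_instance

-- ===== CLAIM (what is proved, stated in full; the proofs are below) =====
def Claim_equal_reason_category_from_reasons : Prop := ∀ (reasons : List String), Dom_reason_category_from_reasons reasons → Spec_reason_category_from_reasons reasons (reason_category_from_reasons reasons)

-- ===== LEMMAS AND PROOFS =====

-- normalize_reason hits category j (j < 8) exactly when the rank is j
set_option maxHeartbeats 1600000 in
theorem norm_eq_iff_rank (r : String) (j : Nat) (hj : j < 8) :
    normalize_reason r = catList.getD j "" ↔ rankOf r = j := by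
  by_cases h0 : PySem.Str.startswith r "dns_flood" = true
  · simp only [normalize_reason, rankOf, catList, rankAux, h0, if_true]
    interval_cases j <;> decide
  by_cases h1 : PySem.Str.startswith r "large_outbound" = true
  · simp only [normalize_reason, rankOf, catList, rankAux, h0, h1, if_true]
    interval_cases j <;> decide
  by_cases h2 : PySem.Str.startswith r "suspicious_port" = true
  · simp only [normalize_reason, rankOf, catList, rankAux, h0, h1, h2, if_true]
    interval_cases j <;> decide
  by_cases h3 : PySem.Str.startswith r "suspicious_process" = true
  · simp only [normalize_reason, rankOf, catList, rankAux, h0, h1, h2, h3, if_true]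
    interval_cases j <;> decide
  by_cases h4 : PySem.Str.startswith r "explicit_credential" = true
  · simp only [normalize_reason, rankOf, catList, rankAux, h0, h1, h2, h3, h4, if_true]
    interval_cases j <;> decide
  by_cases h5 : PySem.Str.startswith r "special_privileges" = true
  · simp only [normalize_reason, rankOf, catList, rankAux, h0, h1, h2, h3, h4, h5, if_true]
    interval_cases j <;> decide
  by_cases h6 : PySem.Str.startswith r "failed_logon" = true
  · simp only [normalize_reason, rankOf, catList, rankAux, h0, h1, h2, h3, h4, h5, h6, if_true]
    interval_cases j <;> decide
  by_cases h7 : PySem.Str.startswith r "credential_validation" = true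
  · simp only [normalize_reason, rankOf, catList, rankAux, h0, h1, h2, h3, h4, h5, h6, h7, if_true]
    interval_cases j <;> decide
  simp only [normalize_reason, rankOf, catList, rankAux, h0, h1, h2, h3, h4, h5, h6, h7, Bool.false_eq_true, if_false]
  constructor
  · intro heq
    exfalso
    split_ifs at heq
    all_goals
      first
        | exact ‹False›
        | exact absurd ‹false = true› (by decide)
        | (interval_cases j <;>
            first
              | exact absurd heq (by decide)
              | (subst heq
                 first
                   | exact h0 (by decide)
                   | exact h1 (by decide)
                   | exact h2 (by decide)
                   | exact h3 (by decide)
                   | exact h4 (by decide)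
                   | exact h5 (by decide)
                   | exact h6 (by decide)
                   | exact h7 (by decide)))
  · intro h
    omega

-- generic: find? on a list whose first m elements fail the predicate and whose m-th
-- (if any) satisfies it returns element m (default past the end)
theorem find?_getD_of_min (cs : List String) (p : String → Bool) (m : Nat) (d : String)
    (hm : m ≤ cs.length)
    (hlow : ∀ j, j < m → p (cs.getD j "") = false)
    (hhit : m < cs.length → p (cs.getD m "") = true) :
    (cs.find? p).getD d = cs.getD m d := by
  induction cs generalizing m with
  | nil => simp [List.find?]
  | cons c cs ih =>
    cases m with
    | zero =>
      have := hhit (by simp)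
      simp at this
      simp [List.find?, this]
    | succ m =>
      have h0 := hlow 0 (Nat.succ_pos m)
      simp at h0
      simp [List.find?, h0]
      exact ih m (by simpa using hm) (fun j hj => hlow (j + 1) (by omega))
        (fun h => hhit (by simpa using h))

-- the fold is a lower bound of acc and of every rank, and is attained
theorem fold_min_spec (reasons : List String) (acc : Nat) :
    reasons.foldl (fun b r => if rankOf r < b then rankOf r else b) acc ≤ acc ∧
    (∀ r ∈ reasons, reasons.foldl (fun b r => if rankOf r < b then rankOf r else b) acc ≤ rankOf r) ∧
    (reasons.foldl (fun b r => if rankOf r < b then rankOf r else b) acc = acc ∨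
      ∃ r ∈ reasons, reasons.foldl (fun b r => if rankOf r < b then rankOf r else b) acc = rankOf r) := by
  induction reasons generalizing acc with
  | nil => simp
  | cons x xs ih =>
    simp only [List.foldl_cons]
    by_cases hc : rankOf x < acc
    · rw [if_pos hc]
      obtain ⟨h1, h2, h3⟩ := ih (rankOf x)
      refine ⟨by omega, ?_, ?_⟩
      · intro r hr
        rcases List.mem_cons.1 hr with h | h
        · subst h; exact h1
        · exact h2 r h
      · rcases h3 with h | ⟨r, hr, h⟩
        · right; exact ⟨x, List.mem_cons_self, h⟩
        · right; exact ⟨r, List.mem_cons_of_mem _ hr, h⟩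
    · rw [if_neg hc]
      obtain ⟨h1, h2, h3⟩ := ih acc
      refine ⟨h1, ?_, ?_⟩
      · intro r hr
        rcases List.mem_cons.1 hr with h | h
        · subst h; omega
        · exact h2 r h
      · rcases h3 with h | ⟨r, hr, h⟩
        · left; exact h
        · right; exact ⟨r, List.mem_cons_of_mem _ hr, h⟩

-- ===== VERDICT (by name: the statement is the Claim_ definition above) =====
theorem reason_category_from_reasons_spec : Claim_equal_reason_category_from_reasons := by
  intro reasons _
  unfold Spec_reason_category_from_reasons
  unfold reason_category_from_reasons reason_category_from_reasons_alt
  set m := reasons.foldl (fun b r => if rankOf r < b then rankOf r else b) catList.length with hm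
  obtain ⟨h1, h2, h3⟩ := fold_min_spec reasons catList.length
  rw [← hm] at h1 h2 h3
  have hlen : catList.length = 8 := by decide
  have hA : ((catList.find? (fun w => (reasons.map normalize_reason).contains w)).getD "other")
      = catList.getD m "other" := by
    apply find?_getD_of_min _ _ m _ (by omega)
    · intro j hj
      by_contra hcontra
      simp only [Bool.not_eq_false, List.contains_eq_mem, decide_eq_true_eq, List.mem_map] at hcontra
      obtain ⟨r, hr, hnr⟩ := hcontra
      have : rankOf r = j := (norm_eq_iff_rank r j (by omega)).1 hnr
      have := h2 r hr
      omega
    · intro hmlt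
      rcases h3 with h | ⟨r, hr, h⟩
      · omega
      · have : normalize_reason r = catList.getD m "" :=
          (norm_eq_iff_rank r m (by omega)).2 h.symm
        simp only [List.contains_eq_mem, decide_eq_true_eq, List.mem_map]
        exact ⟨r, hr, this⟩
  simp only [catList] at hA ⊢
  rw [hA]
  by_cases hlt : m < 8
  · simp [hlt]
  · have : m = 8 := by omega
    simp [this]
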